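-- pv_equiv track=rewrite | github.com/WinsonTsangWan/MusicPlatformPlaylistConverter | ConverterClass.py | remove_parentheses
-- ===== SOURCE A (Python) =====
-- def remove_parentheses(song_title: str) -> str:
--     '''
--     Short helper function to remove parenthetical segments from song titles.
--     (eg. )\n
--     Parameters:
--     - (str) song_title: Song titles from which to remove parenthetical segments\n
--     Return:
--     - (str) song_title with parenthetical segments removed
--     '''
--     result = ""
--     stop = 0
--     for char in song_title:
--         if char == "(":
--             stop += 1
--         elif stop == 0:
--             result += char
--         elif char == ")":
--             stop -= 1
--     return result
-- ===== SOURCE B (Python) =====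
-- def remove_parentheses(song_title: str) -> str:
--     # Pass 1: record the clamped parenthesis depth before each character.
--     depths = []
--     cur = 0
--     for c in song_title:
--         depths.append(cur)
--         if c == "(":
--             cur += 1
--         elif c == ")" and cur > 0:
--             cur -= 1
--     # Pass 2: keep characters seen at depth 0 that are not '('.
--     return "".join(c for c, d in zip(song_title, depths) if d == 0 and c != "(")
-- ===== Notes on version B (the rewrite author's own statement) =====
-- stated objective: alternative
-- what changed: Replaces A's single loop that interleaves depth counting with string accumulation by a two-pass decomposition: first build a table of clamped depths before each character, then filter via zip over that table.
import Mathlib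
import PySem

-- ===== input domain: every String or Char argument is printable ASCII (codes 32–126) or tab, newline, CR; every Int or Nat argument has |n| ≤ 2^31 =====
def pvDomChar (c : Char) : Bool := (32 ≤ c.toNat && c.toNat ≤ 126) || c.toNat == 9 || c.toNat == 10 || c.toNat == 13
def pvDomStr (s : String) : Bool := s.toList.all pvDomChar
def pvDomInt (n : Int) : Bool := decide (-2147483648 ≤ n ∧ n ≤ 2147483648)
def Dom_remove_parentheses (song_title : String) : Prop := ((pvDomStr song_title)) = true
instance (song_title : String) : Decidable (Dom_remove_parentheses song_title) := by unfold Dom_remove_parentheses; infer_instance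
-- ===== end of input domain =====

-- B replaces A's single counting-and-accumulating loop by a two-pass decomposition
-- (depth table, then zip-filter); alternative structure, same cost.


-- ===== PORT A =====
-- A: one loop over the characters; state (result, stop); result kept as List Char
-- (Python's string concatenation), rebuilt into a String at the end.
def remove_parentheses (song_title : String) : String :=
  let st := song_title.toList.foldl
    (fun (acc : List Char × Int) char =>
      if char = '(' then (acc.1, acc.2 + 1)
      else if acc.2 = 0 then (acc.1 ++ [char], acc.2)
      else if char = ')' then (acc.1, acc.2 - 1)
      else acc)
    ([], 0)
  String.mk st.1

-- ===== PORT B =====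
-- B pass 1: build the list of clamped depths recorded before each character.
def rpDepthPass (cs : List Char) : List Int × Int :=
  cs.foldl
    (fun (acc : List Int × Int) c =>
      let depths := acc.1 ++ [acc.2]
      if c = '(' then (depths, acc.2 + 1)
      else if c = ')' ∧ 0 < acc.2 then (depths, acc.2 - 1)
      else (depths, acc.2))
    ([], 0)

-- B pass 2: keep characters whose recorded depth is 0 and that are not '('.
def remove_parentheses_alt (song_title : String) : String :=
  let cs := song_title.toList
  let depths := (rpDepthPass cs).1
  String.mk (((cs.zip depths).filter (fun cd => cd.2 == 0 && cd.1 != '(')).map Prod.fst)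

-- ===== PRECONDITION & SPEC =====
def Spec_remove_parentheses (song_title : String) (out : String) : Prop := out = remove_parentheses_alt song_title
instance (song_title : String) (out : String) : Decidable (Spec_remove_parentheses song_title out) := by unfold Spec_remove_parentheses; infer_instance

-- ===== CLAIM (what is proved, stated in full; the proofs are below) =====
def Claim_equal_remove_parentheses : Prop := ∀ (song_title : String), Dom_remove_parentheses song_title → Spec_remove_parentheses song_title (remove_parentheses song_title)

-- ===== LEMMAS AND PROOFS =====

-- recursive characterisation of the depth table produced by B's first pass
def rpDepths (cs : List Char) (d : Int) : List Int :=
  match cs with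
  | [] => []
  | c :: cs' =>
      d :: rpDepths cs' (if c = '(' then d + 1 else if c = ')' ∧ 0 < d then d - 1 else d)

theorem rpDepthPass_fst (cs : List Char) :
    ∀ (pre : List Int) (d : Int),
      (cs.foldl
        (fun (acc : List Int × Int) c =>
          let depths := acc.1 ++ [acc.2]
          if c = '(' then (depths, acc.2 + 1)
          else if c = ')' ∧ 0 < acc.2 then (depths, acc.2 - 1)
          else (depths, acc.2))
        (pre, d)).1 = pre ++ rpDepths cs d := by
  induction cs with
  | nil => intro pre d; simp [rpDepths]
  | cons c cs ih =>
      intro pre d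
      simp only [List.foldl_cons, rpDepths]
      by_cases h1 : c = '('
      · simp [h1, ih]
      · by_cases h2 : c = ')' ∧ 0 < d
        · simp [h1, h2, ih]
        · simp [h1, h2, ih]

-- A's loop, from any state with non-negative stop, appends exactly the zip-filtered chars
theorem aLoop_eq (cs : List Char) :
    ∀ (res : List Char) (d : Int), 0 ≤ d →
      (cs.foldl
        (fun (acc : List Char × Int) char =>
          if char = '(' then (acc.1, acc.2 + 1)
          else if acc.2 = 0 then (acc.1 ++ [char], acc.2)
          else if char = ')' then (acc.1, acc.2 - 1)
          else acc)
        (res, d)).1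
      = res ++ ((cs.zip (rpDepths cs d)).filter (fun cd => cd.2 == 0 && cd.1 != '(')).map Prod.fst := by
  induction cs with
  | nil => intro res d _; simp [rpDepths]
  | cons c cs ih =>
      intro res d hd
      simp only [List.foldl_cons, rpDepths, List.zip_cons_cons, List.filter_cons]
      by_cases h1 : c = '('
      · simp only [h1]
        simp
        exact ih res (d + 1) (by omega)
      · by_cases h2 : d = 0
        · subst h2
          have hg : (((0 : Int) == 0) && (c != '(')) = true := by simp [h1]
          have h2' : ¬ (c = ')' ∧ (0 : Int) < 0) := by omega
          simp [h1, hg, h2', ih (res ++ [c]) 0 le_rfl]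
        · have hg : (((d : Int) == 0) && (c != '(')) = false := by simp [h2]
          by_cases h3 : c = ')'
          · have h2' : c = ')' ∧ 0 < d := ⟨h3, by omega⟩
            simp [h1, h2, h3, hg, h2', ih _ (d - 1) (by omega)]
          · have h2' : ¬ (c = ')' ∧ 0 < d) := fun h => h3 h.1
            simp [h1, h2, h3, hg, h2', ih _ d hd]

-- ===== VERDICT (by name: the statement is the Claim_ definition above) =====
theorem remove_parentheses_spec : Claim_equal_remove_parentheses := by
  intro s _
  unfold Spec_remove_parentheses remove_parentheses remove_parentheses_alt rpDepthPass
  simp only [rpDepthPass_fst s.toList [] 0, aLoop_eq s.toList [] 0 le_rfl, List.nil_append]
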